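-- pv_equiv track=rewrite | github.com/gyang274/leetcode | src/1400-1499/1494.parallel.courses.py | minNumberOfSemesters
-- ===== SOURCE A (Python) =====
-- from typing import List
--
-- def minNumberOfSemesters(n: int, dependencies: List[List[int]], k: int) -> int:
--   # TC: O(2^n * 2^k), bitmask
--   # prep[i]: bitmask of i-th course (0-indexed) prerequisite
--   prep = [0] * n
--   for i, j in dependencies:
--     prep[j - 1] |= 1 << (i - 1)
--   # ones: number of 1s in a bitmask
--   ones = [0] * (1 << n)
--   for x in range(1 << n):
--     ones[x] = bin(x).count('1')
--   # dynamic programming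
--   # dp[x] is the min days to complete all courses reprsented by bitmask x, which is upper bounded by n
--   dp = [n] * (1 << n)
--   # init
--   dp[0] = 0
--   # main
--   #  loop through bitmask
--   for x in range(1 << n):
--     # x is the bitmask of all courses taken
--     if dp[x] == n:
--       continue
--     # y is the bitmask of all courses can be taken after x
--     y = 0
--     for i in range(n):
--       # all prerequisite of course i satisified
--       if x & prep[i] == prep[i]:
--         y |= 1 << i
--     # and delete all courses taken, no re-taken
--     y &= ~x
--     # enumerate over all subsets of a bit representation
--     z = y
--     while z:
--       # enumerate all bit 1s combinations of y, where num 1s <= k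
--       if ones[z] <= k:
--         # this combinations has less than k courses that all available to take, so take them all in one semester.
--         dp[x | z] = min(dp[x | z], dp[x] + 1)
--       z = (z - 1) & y
--   return dp[-1]
-- ===== SOURCE B (Python) =====
-- from typing import List
--
-- def minNumberOfSemesters(n: int, dependencies: List[List[int]], k: int) -> int:
--   # BFS over taken-course bitmasks, level = semester; visits only reachable states
--   # and stops at the first time the full mask appears (A scans the whole 2^n DP table).
--   prep = [0] * n
--   for i, j in dependencies:
--     prep[j - 1] |= 1 << (i - 1)
--   full = (1 << n) - 1
--   visited = [False] * (1 << n)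
--   visited[0] = True
--   frontier = [0]
--   for sem in range(1, n + 1):
--     nxt = []
--     for x in frontier:
--       # courses whose prerequisites are all inside x, minus courses already taken
--       y = 0
--       for i in range(n):
--         if x & prep[i] == prep[i]:
--           y |= 1 << i
--       y &= ~x
--       # every way to take <= k of them this semester
--       z = y
--       while z:
--         if bin(z).count('1') <= k:
--           m = x | z
--           if m == full:
--             return sem
--           if not visited[m]:
--             visited[m] = True
--             nxt.append(m)
--         z = (z - 1) & y
--     frontier = nxt
--   return n  # n semesters never suffice only when the input is unsatisfiable (cycle / k<=0); A's dp cap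
-- ===== Notes on version B (the rewrite author's own statement) =====
-- stated objective: faster
-- what changed: Replaces A's dynamic-programming scan over the entire 2^n bitmask table (plus a precomputed 2^n popcount table) by a level-by-level BFS with a frontier queue and a visited table that explores only reachable course-set states and returns the moment the full mask is produced.
import Mathlib
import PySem

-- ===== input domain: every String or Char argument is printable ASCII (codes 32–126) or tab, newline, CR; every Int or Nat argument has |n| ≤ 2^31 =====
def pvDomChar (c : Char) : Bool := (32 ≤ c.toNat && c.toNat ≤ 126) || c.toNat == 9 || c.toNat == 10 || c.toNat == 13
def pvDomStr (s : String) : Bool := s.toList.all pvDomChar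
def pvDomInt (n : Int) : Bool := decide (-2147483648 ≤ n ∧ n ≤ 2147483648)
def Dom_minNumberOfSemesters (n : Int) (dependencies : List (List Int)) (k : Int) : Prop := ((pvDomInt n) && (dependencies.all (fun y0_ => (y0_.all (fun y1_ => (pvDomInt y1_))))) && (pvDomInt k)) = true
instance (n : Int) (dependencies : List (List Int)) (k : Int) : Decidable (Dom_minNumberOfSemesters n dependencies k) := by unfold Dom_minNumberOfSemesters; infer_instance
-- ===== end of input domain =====

-- B replaces A's full 2^n dynamic-programming table scan by a level-by-level BFS over
-- reachable course-set states that stops as soon as the full mask is produced.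

-- ===== PORT A =====

-- popcount; ports Python's bin(x).count('1') (exact for x ≥ 0, the only use here)
def pc (m : Nat) : Nat :=
  if h : m = 0 then 0 else m % 2 + pc (m / 2)
decreasing_by exact Nat.div_lt_self (Nat.pos_of_ne_zero h) (by decide)

-- prep[j-1] |= 1 << (i-1)  (a negative index j-1 wraps from the end, as in Python;
-- rows on which Python raises — wrong arity, index still out of range, i < 1 — are
-- outside Pre_, the port just skips/clamps them there)
def prepStep (n : Int) (prep : List Nat) (d : List Int) : List Nat :=
  match d with
  | [i, j] =>
    let idx : Int := if j - 1 < 0 then j - 1 + n else j - 1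
    if idx < 0 then prep
    else
      match prep[idx.toNat]? with
      | some v => prep.set idx.toNat (v ||| 1 <<< (i - 1).toNat)
      | none => prep
  | _ => prep

def buildPrep (n : Int) (deps : List (List Int)) : List Nat :=
  deps.foldl (prepStep n) (List.replicate n.toNat 0)

-- y = OR of 1<<i over i in range(n) with x & prep[i] == prep[i]; then y &= ~x
-- (on nonnegative Python ints, y & ~x is exactly Nat.ldiff y x)
def availMask (N : Nat) (prep : List Nat) (x : Nat) : Nat :=
  Nat.ldiff
    ((List.range N).foldl
      (fun y i => if x &&& prep.getD i 0 = prep.getD i 0 then y ||| 1 <<< i else y) 0)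
    x

theorem sub_and_lt {z : Nat} (y : Nat) (h : z ≠ 0) : (z - 1) &&& y < z :=
  Nat.lt_of_le_of_lt Nat.and_le_left (Nat.sub_lt (Nat.pos_of_ne_zero h) Nat.one_pos)

-- A's inner `while z:` loop: dp[x|z] = min(dp[x|z], dp[x]+1) for submasks with ones[z] <= k
def relaxA (ones : Array Int) (k : Int) (x y : Nat) (z : Nat) (dp : Array Int) : Array Int :=
  if h : z = 0 then dp
  else
    relaxA ones k x y ((z - 1) &&& y)
      (if ones.getD z 0 ≤ k then
        dp.setIfInBounds (x ||| z) (min (dp.getD (x ||| z) 0) (dp.getD x 0 + 1))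
      else dp)
decreasing_by exact sub_and_lt y h

-- body of A's `for x in range(1 << n)` loop
def stepA (n k : Int) (N : Nat) (prep : List Nat) (ones : Array Int) (dp : Array Int) (x : Nat) : Array Int :=
  if dp.getD x 0 = n then dp
  else relaxA ones k x (availMask N prep x) (availMask N prep x) dp

def minNumberOfSemesters (n : Int) (dependencies : List (List Int)) (k : Int) : Int :=
  let N := n.toNat
  let prep := buildPrep n dependencies
  -- ones[x] = bin(x).count('1') for x in range(1 << n)
  let ones : Array Int := ((List.range (2 ^ N)).map fun x => (pc x : Int)).toArray
  -- dp = [n] * (1 << n); dp[0] = 0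
  let dp0 : Array Int := (Array.replicate (2 ^ N) n).setIfInBounds 0 0
  let dpF := (List.range (2 ^ N)).foldl (fun dp x => stepA n k N prep ones dp x) dp0
  -- return dp[-1] (dp is nonempty)
  match dpF.back? with
  | some v => v
  | none => 0  -- never taken

-- ===== PORT B =====

-- B's inner submask scan: every way to take ≤ k available courses this semester;
-- `none` signals Python's `return sem` (full mask produced), otherwise the updated
-- (visited, next-frontier) pair.  visited is a Python set: append-if-absent.
def scanB (k : Int) (full x y : Nat) (z : Nat) (vis : Array Bool) (nxt : List Nat) :
    Option (Array Bool × List Nat) :=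
  if h : z = 0 then some (vis, nxt)
  else if (pc z : Int) ≤ k then
    if x ||| z = full then none
    else if vis.getD (x ||| z) false then scanB k full x y ((z - 1) &&& y) vis nxt
    else scanB k full x y ((z - 1) &&& y)
      (vis.setIfInBounds (x ||| z) true) (nxt ++ [x ||| z])
  else scanB k full x y ((z - 1) &&& y) vis nxt
decreasing_by all_goals exact sub_and_lt y h

-- `for x in frontier:` of one BFS level
def roundB (k : Int) (N : Nat) (prep : List Nat) (full : Nat) (front : List Nat)
    (vis : Array Bool) (nxt : List Nat) : Option (Array Bool × List Nat) :=
  match front with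
  | [] => some (vis, nxt)
  | x :: rest =>
    match scanB k full x (availMask N prep x) (availMask N prep x) vis nxt with
    | none => none
    | some (vis', nxt') => roundB k N prep full rest vis' nxt'

-- `for sem in range(1, n+1):` — fuel counts the remaining semesters
def bfsB (n k : Int) (N : Nat) (prep : List Nat) (full : Nat) (fuel : Nat) (sem : Int)
    (front : List Nat) (vis : Array Bool) : Int :=
  match fuel with
  | 0 => n
  | fuel' + 1 =>
    match roundB k N prep full front vis [] with
    | none => sem
    | some (vis', nxt) => bfsB n k N prep full fuel' (sem + 1) nxt vis'

def minNumberOfSemesters_alt (n : Int) (dependencies : List (List Int)) (k : Int) : Int :=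
  let N := n.toNat
  -- visited = [False] * (1 << n); visited[0] = True
  bfsB n k N (buildPrep n dependencies) (2 ^ N - 1) N 1 [0]
    ((Array.replicate (2 ^ N) false).setIfInBounds 0 true)

-- ===== PRECONDITION & SPEC =====

-- Pre_ excludes exactly the inputs on which Python A raises: negative n (negative
-- shift in 1 << n), dependency rows that are not pairs, i < 1 (negative shift in
-- 1 << (i-1)), and j with index j-1 outside Python's list-index range [-n, n-1].
def Pre_minNumberOfSemesters (n : Int) (dependencies : List (List Int)) (k : Int) : Prop :=
  0 ≤ n ∧ ∀ d ∈ dependencies,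
    d.length = 2 ∧ 1 ≤ d.getD 0 0 ∧ 1 - n ≤ d.getD 1 0 ∧ d.getD 1 0 ≤ n
instance (n : Int) (dependencies : List (List Int)) (k : Int) : Decidable (Pre_minNumberOfSemesters n dependencies k) := by unfold Pre_minNumberOfSemesters; infer_instance

def pvWitness_minNumberOfSemesters : Int × List (List Int) × Int := (2, [[1, 2]], 1)

def Spec_minNumberOfSemesters (n : Int) (dependencies : List (List Int)) (k : Int) (out : Int) : Prop := out = minNumberOfSemesters_alt n dependencies k
instance (n : Int) (dependencies : List (List Int)) (k : Int) (out : Int) : Decidable (Spec_minNumberOfSemesters n dependencies k out) := by unfold Spec_minNumberOfSemesters; infer_instance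

-- ===== CLAIM (what is proved, stated in full; the proofs are below) =====
def Claim_equal_minNumberOfSemesters : Prop := ∀ (n : Int) (dependencies : List (List Int)) (k : Int), Dom_minNumberOfSemesters n dependencies k → Pre_minNumberOfSemesters n dependencies k → Spec_minNumberOfSemesters n dependencies k (minNumberOfSemesters n dependencies k)

-- ===== LEMMAS AND PROOFS =====

-- bit toolkit
theorem and_mod_two (m n : Nat) : (m &&& n) % 2 = ((m % 2) &&& (n % 2)) := by
  rw [← Nat.and_one_is_mod (m &&& n), Nat.and_assoc, Nat.and_one_is_mod n]
  rcases Nat.mod_two_eq_zero_or_one n with h | h <;> rw [h]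
  · simp
  · rw [Nat.and_one_is_mod m, Nat.and_one_is_mod (m % 2)]
    omega

theorem and_decomp (m n : Nat) : m &&& n = 2 * (m / 2 &&& n / 2) + ((m % 2) &&& (n % 2)) := by
  conv_lhs => rw [← Nat.div_add_mod (m &&& n) 2]
  rw [Nat.and_div_two, and_mod_two]

theorem submask_pred {z w : Nat} (y : Nat) (hz : z &&& y = z) (hw : w &&& y = w) (hlt : w < z) :
    w ≤ (z - 1) &&& y := by
  induction z using Nat.strong_induction_on generalizing y w with
  | _ z IH =>
  have hz0 : z ≠ 0 := by omega
  have hza : ((z % 2) &&& (y % 2)) = z % 2 ∧ z / 2 &&& y / 2 = z / 2 := by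
    have h1 := and_decomp z y
    have h2 : z / 2 &&& y / 2 ≤ z / 2 := Nat.and_le_left
    have h3 : ((z % 2) &&& (y % 2)) ≤ z % 2 := Nat.and_le_left
    have h4 : z % 2 < 2 := Nat.mod_lt _ (by decide)
    omega
  have hwa : ((w % 2) &&& (y % 2)) = w % 2 ∧ w / 2 &&& y / 2 = w / 2 := by
    have h1 := and_decomp w y
    have h2 : w / 2 &&& y / 2 ≤ w / 2 := Nat.and_le_left
    have h3 : ((w % 2) &&& (y % 2)) ≤ w % 2 := Nat.and_le_left
    have h4 : w % 2 < 2 := Nat.mod_lt _ (by decide)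
    omega
  rcases Nat.mod_two_eq_zero_or_one z with hzb | hzb
  · -- z even
    have ha0 : z / 2 ≠ 0 := by omega
    have hb : w / 2 < z / 2 := by omega
    have hIH := IH (z / 2) (by omega) (y / 2) hza.2 hwa.2 hb
    have hd : (z - 1) &&& y = 2 * ((z / 2 - 1) &&& (y / 2)) + ((1 : Nat) &&& (y % 2)) := by
      have := and_decomp (z - 1) y
      have h5 : (z - 1) / 2 = z / 2 - 1 := by omega
      have h6 : (z - 1) % 2 = 1 := by omega
      rw [h5, h6] at this
      exact this
    have he : ((1 : Nat) &&& (y % 2)) = y % 2 := by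
      rcases Nat.mod_two_eq_zero_or_one y with h | h <;> rw [h] <;> decide
    have hwf : w % 2 ≤ y % 2 := by
      have h7 : ((w % 2) &&& (y % 2)) ≤ y % 2 := Nat.and_le_right
      omega
    omega
  · -- z odd
    have hd : (z - 1) &&& y = 2 * (z / 2 &&& y / 2) + ((0 : Nat) &&& (y % 2)) := by
      have := and_decomp (z - 1) y
      have h5 : (z - 1) / 2 = z / 2 := by omega
      have h6 : (z - 1) % 2 = 0 := by omega
      rw [h5, h6] at this
      exact this
    have h8 : ((0 : Nat) &&& (y % 2)) = 0 := by simp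
    omega

theorem and_right_self {a y : Nat} : (a &&& y) &&& y = a &&& y := by
  rw [Nat.and_assoc, Nat.and_self]

theorem le_of_and_eq {w y : Nat} (h : w &&& y = w) : w ≤ y := h ▸ Nat.and_le_right

theorem and_zero_of_sub {w y x : Nat} (hw : w &&& y = w) (hxy : y &&& x = 0) : w &&& x = 0 := by
  rw [← hw, Nat.and_assoc, hxy, Nat.and_zero]

theorem or_cancel_left {x w v : Nat} (hw : w &&& x = 0) (hv : v &&& x = 0)
    (h : x ||| w = x ||| v) : w = v := by
  apply Nat.eq_of_testBit_eq
  intro i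
  have hw' : (w.testBit i && x.testBit i) = false := by
    rw [← Nat.testBit_and, hw, Nat.zero_testBit]
  have hv' : (v.testBit i && x.testBit i) = false := by
    rw [← Nat.testBit_and, hv, Nat.zero_testBit]
  have h' : (x.testBit i || w.testBit i) = (x.testBit i || v.testBit i) := by
    rw [← Nat.testBit_or, ← Nat.testBit_or, h]
  cases hx : x.testBit i <;> simp [hx] at hw' hv' h' <;> simp [hw', hv', h']

theorem or_ne_of_disj {x w : Nat} (hne : w ≠ 0) (hw : w &&& x = 0) : x ||| w ≠ x := by
  intro h
  exact hne (or_cancel_left hw (by simp) (by simpa using h))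

theorem lt_or_of_disj {x w : Nat} (hne : w ≠ 0) (hw : w &&& x = 0) : x < x ||| w :=
  Nat.lt_of_le_of_ne Nat.left_le_or (fun h => or_ne_of_disj hne hw h.symm)

-- sInf toolkit
theorem capInf_le (S : Set ℕ) (N : ℕ) : sInf (S ∪ {N}) ≤ N := Nat.sInf_le (Or.inr rfl)

theorem capInf_le_mem {S : Set ℕ} {N s : ℕ} (h : s ∈ S) : sInf (S ∪ {N}) ≤ s :=
  Nat.sInf_le (Or.inl h)

theorem capInf_cases (S : Set ℕ) (N : ℕ) : sInf (S ∪ {N}) ∈ S ∨ sInf (S ∪ {N}) = N := by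
  have := Nat.sInf_mem (s := S ∪ {N}) ⟨N, Or.inr rfl⟩
  rcases this with h | h
  · exact Or.inl h
  · exact Or.inr h

theorem capInf_eq {S : Set ℕ} {N v : ℕ} (hmem : v ∈ S ∪ ({N} : Set ℕ))
    (hlb : ∀ u ∈ S, v ≤ u) (hN : v ≤ N) : sInf (S ∪ {N}) = v := by
  apply le_antisymm (Nat.sInf_le hmem)
  rcases capInf_cases S N with h | h
  · exact hlb _ h
  · omega

theorem capInf_union_succ {S T : Set ℕ} {N : ℕ} (hT : sInf (T ∪ {N}) < N) :
    sInf ((S ∪ {s | ∃ s', s' ∈ T ∧ s = s' + 1}) ∪ {N})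
      = min (sInf (S ∪ {N})) (sInf (T ∪ {N}) + 1) := by
  have hb : sInf (T ∪ {N}) ∈ T := by
    rcases capInf_cases T N with h | h
    · exact h
    · omega
  apply le_antisymm
  · rcases Nat.le_total (sInf (S ∪ {N})) (sInf (T ∪ {N}) + 1) with h | h
    · rw [Nat.min_eq_left h]
      rcases capInf_cases S N with h' | h'
      · exact capInf_le_mem (Or.inl h')
      · calc sInf _ ≤ N := capInf_le _ _
          _ = sInf (S ∪ {N}) := h'.symm
    · rw [Nat.min_eq_right h]
      exact capInf_le_mem (Or.inr ⟨_, hb, rfl⟩)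
  · rcases capInf_cases (S ∪ {s | ∃ s', s' ∈ T ∧ s = s' + 1}) N with h | h
    · rcases h with h | hm
      · exact le_trans (Nat.min_le_left _ _) (capInf_le_mem h)
      · obtain ⟨s', hs', hseq⟩ := hm
        have h2 := capInf_le_mem (N := N) hs'
        omega
    · rw [h]
      have h1 : sInf (S ∪ {N}) ≤ N := capInf_le _ _
      omega

theorem capInf_union_succ_stable {S T : Set ℕ} {N : ℕ} (hT : sInf (T ∪ {N}) = N) :
    sInf ((S ∪ {s | ∃ s', s' ∈ T ∧ s = s' + 1}) ∪ {N}) = sInf (S ∪ {N}) := by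
  apply le_antisymm
  · rcases capInf_cases S N with h | h
    · exact capInf_le_mem (Or.inl h)
    · rw [h]; exact capInf_le _ _
  · rcases capInf_cases (S ∪ {s | ∃ s', s' ∈ T ∧ s = s' + 1}) N with h | h
    · rcases h with h | hm
      · exact capInf_le_mem h
      · obtain ⟨s', hs', hseq⟩ := hm
        have h1 : N ≤ s' := by have := capInf_le_mem (N := N) hs'; omega
        have h2 : sInf (S ∪ {N}) ≤ N := capInf_le _ _
        omega
    · rw [h]; exact capInf_le _ _

-- graph lemmas

-- `Stp N prep k x m`: one semester can move the taken-set bitmask x to m.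
def Stp (N : Nat) (prep : List Nat) (k : Int) (x m : Nat) : Prop :=
  ∃ w, w ≠ 0 ∧ w &&& availMask N prep x = w ∧ (pc w : Int) ≤ k ∧ m = x ||| w

-- reachable in exactly s semesters from the empty mask
inductive Rch (N : Nat) (prep : List Nat) (k : Int) : Nat → Nat → Prop
  | zero : Rch N prep k 0 0
  | succ {s x m} : Rch N prep k s x → Stp N prep k x m → Rch N prep k (s + 1) m

-- reachable in exactly s semesters with every state before the last one < X
inductive RchV (N : Nat) (prep : List Nat) (k : Int) : Nat → Nat → Nat → Prop
  | zero (X) : RchV N prep k X 0 0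
  | succ {X s x m} : RchV N prep k X s x → x < X → Stp N prep k x m → RchV N prep k X (s + 1) m

-- the common value of both programs: min(n, semester-distance of the full mask)
noncomputable def dCap (N : Nat) (prep : List Nat) (k : Int) : Nat :=
  sInf ({s | Rch N prep k s (2 ^ N - 1)} ∪ {N})


theorem ldiff_le (a x : Nat) : Nat.ldiff a x ≤ a := by
  apply Nat.le_of_testBit
  intro i h
  rw [Nat.testBit_ldiff] at h
  exact (Bool.and_eq_true_iff.mp h).1

theorem avail_and (N : Nat) (prep : List Nat) (x : Nat) : availMask N prep x &&& x = 0 := by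
  apply Nat.eq_of_testBit_eq
  intro i
  cases h : x.testBit i <;>
    simp [availMask, Nat.testBit_and, Nat.testBit_ldiff, Nat.zero_testBit, h]

theorem avail_lt (N : Nat) (prep : List Nat) (x : Nat) : availMask N prep x < 2 ^ N := by
  have h1 : ∀ (l : List Nat) (y0 : Nat), (∀ i ∈ l, i < N) → y0 < 2 ^ N →
      (l.foldl (fun y i => if x &&& prep.getD i 0 = prep.getD i 0 then y ||| 1 <<< i else y) y0)
        < 2 ^ N := by
    intro l
    induction l with
    | nil => exact fun y0 _ h => h
    | cons a l ih =>
      intro y0 hmem hy0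
      rw [List.foldl_cons]
      apply ih _ (fun i hi => hmem i (List.mem_cons_of_mem _ hi))
      by_cases hc : x &&& prep.getD a 0 = prep.getD a 0
      · rw [if_pos hc]
        refine Nat.or_lt_two_pow hy0 ?_
        rw [Nat.one_shiftLeft]
        exact Nat.pow_lt_pow_right (by decide) (hmem a List.mem_cons_self)
      · rw [if_neg hc]; exact hy0
  exact Nat.lt_of_le_of_lt (ldiff_le _ _)
    (h1 _ _ (fun i hi => List.mem_range.mp hi) (Nat.two_pow_pos N))

theorem Stp_lt {N : Nat} {prep : List Nat} {k : Int} {x m : Nat} (h : Stp N prep k x m) :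
    x < m := by
  obtain ⟨w, hw0, hwsub, _, rfl⟩ := h
  exact lt_or_of_disj hw0 (and_zero_of_sub hwsub (avail_and N prep x))

theorem Stp_lt_pow {N : Nat} {prep : List Nat} {k : Int} {x m : Nat} (hx : x < 2 ^ N)
    (h : Stp N prep k x m) : m < 2 ^ N := by
  obtain ⟨w, _, hwsub, _, rfl⟩ := h
  exact Nat.or_lt_two_pow hx (Nat.lt_of_le_of_lt (le_of_and_eq hwsub) (avail_lt N prep x))

theorem Rch_lt_pow {N : Nat} {prep : List Nat} {k : Int} {s t : Nat}
    (h : Rch N prep k s t) : t < 2 ^ N := by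
  induction h with
  | zero => exact Nat.two_pow_pos N
  | succ _ hst ih => exact Stp_lt_pow ih hst

theorem RchV_to_Rch {N : Nat} {prep : List Nat} {k : Int} {X s t : Nat}
    (h : RchV N prep k X s t) : Rch N prep k s t := by
  induction h with
  | zero => exact Rch.zero
  | succ _ _ hst ih => exact Rch.succ ih hst

theorem Rch_to_RchV {N : Nat} {prep : List Nat} {k : Int} {s t : Nat}
    (h : Rch N prep k s t) : ∀ X, t ≤ X → RchV N prep k X s t := by
  induction h with
  | zero => exact fun X _ => RchV.zero X
  | succ _ hst ih =>
    intro X hX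
    have hx := Nat.lt_of_lt_of_le (Stp_lt hst) hX
    exact RchV.succ (ih X (Nat.le_of_lt hx)) hx hst

theorem RchV_mono {N : Nat} {prep : List Nat} {k : Int} {X X' s t : Nat}
    (h : RchV N prep k X s t) (hX : X ≤ X') : RchV N prep k X' s t := by
  induction h with
  | zero => exact RchV.zero X'
  | succ _ hx hst ih => exact RchV.succ ih (Nat.lt_of_lt_of_le hx hX) hst

theorem RchV_succX {N : Nat} {prep : List Nat} {k : Int} {X s t : Nat} :
    RchV N prep k (X + 1) s t ↔
      RchV N prep k X s t ∨
        (∃ s', s = s' + 1 ∧ RchV N prep k X s' X ∧ Stp N prep k X t) := by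
  constructor
  · intro h
    cases h with
    | zero => exact Or.inl (RchV.zero X)
    | succ h hx hst =>
      rename_i s' x
      have hR := RchV_to_Rch h
      rcases Nat.lt_or_ge x X with hlt | hge
      · exact Or.inl (RchV.succ (Rch_to_RchV hR X (Nat.le_of_lt hlt)) hlt hst)
      · have hxX : x = X := by omega
        subst hxX
        exact Or.inr ⟨s', rfl, Rch_to_RchV hR x Nat.le.refl, hst⟩
  · rintro (h | ⟨s', rfl, hX', hst⟩)
    · exact RchV_mono h (Nat.le_succ X)
    · exact RchV.succ (RchV_mono hX' (Nat.le_succ X)) (Nat.lt_succ_self X) hst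

theorem RchV_zero_iff {N : Nat} {prep : List Nat} {k : Int} {s t : Nat} :
    RchV N prep k 0 s t ↔ s = 0 ∧ t = 0 := by
  constructor
  · intro h
    cases h with
    | zero => exact ⟨rfl, rfl⟩
    | succ _ hx _ => omega
  · rintro ⟨rfl, rfl⟩
    exact RchV.zero 0

theorem Rch_zero_iff {N : Nat} {prep : List Nat} {k : Int} {t : Nat} :
    Rch N prep k 0 t ↔ t = 0 := by
  constructor
  · intro h
    cases h
    rfl
  · rintro rfl
    exact Rch.zero

-- semester-distance predicates for B's BFS
def dLE (N : Nat) (prep : List Nat) (k : Int) (s m : Nat) : Prop :=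
  ∃ t, t ≤ s ∧ Rch N prep k t m

def Frt (N : Nat) (prep : List Nat) (k : Int) (s m : Nat) : Prop :=
  Rch N prep k s m ∧ ∀ t, Rch N prep k t m → s ≤ t

theorem exists_min_rch {N : Nat} {prep : List Nat} {k : Int} {t m : Nat}
    (h : Rch N prep k t m) : ∃ t0, Frt N prep k t0 m ∧ t0 ≤ t := by
  have hne : {u | Rch N prep k u m}.Nonempty := ⟨t, h⟩
  have hmem := Nat.sInf_mem hne
  exact ⟨sInf {u | Rch N prep k u m}, ⟨hmem, fun u hu => Nat.sInf_le hu⟩, Nat.sInf_le h⟩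

theorem dLE_succ_iff {N : Nat} {prep : List Nat} {k : Int} {s m : Nat} :
    dLE N prep k (s + 1) m ↔
      dLE N prep k s m ∨ ∃ x, Frt N prep k s x ∧ Stp N prep k x m := by
  constructor
  · rintro ⟨t, ht, hR⟩
    rcases Nat.lt_or_ge t (s + 1) with hlt | hge
    · exact Or.inl ⟨t, by omega, hR⟩
    · have ht' : t = s + 1 := by omega
      subst ht'
      cases hR with
      | @succ s' x _ hR' hst =>
        obtain ⟨t0, hF, ht0⟩ := exists_min_rch hR'
        rcases Nat.lt_or_ge t0 s with hlt0 | hge0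
        · exact Or.inl ⟨t0 + 1, by omega, Rch.succ hF.1 hst⟩
        · have : t0 = s := by omega
          subst this
          exact Or.inr ⟨x, hF, hst⟩
  · rintro (⟨t, ht, hR⟩ | ⟨x, hF, hst⟩)
    · exact ⟨t, by omega, hR⟩
    · exact ⟨s + 1, Nat.le.refl, Rch.succ hF.1 hst⟩

theorem Frt_succ_iff {N : Nat} {prep : List Nat} {k : Int} {s m : Nat} :
    Frt N prep k (s + 1) m ↔
      (∃ x, Frt N prep k s x ∧ Stp N prep k x m) ∧ ¬ dLE N prep k s m := by
  constructor
  · rintro ⟨hR, hmin⟩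
    refine ⟨?_, ?_⟩
    · cases hR with
      | @succ s' x _ hR' hst =>
        obtain ⟨t0, hF, ht0⟩ := exists_min_rch hR'
        have h1 : s + 1 ≤ t0 + 1 := hmin _ (Rch.succ hF.1 hst)
        have h2 : t0 = s := by omega
        subst h2
        exact ⟨x, hF, hst⟩
    · rintro ⟨t, ht, hR'⟩
      have := hmin _ hR'
      omega
  · rintro ⟨⟨x, hF, hst⟩, hnot⟩
    refine ⟨Rch.succ hF.1 hst, ?_⟩
    intro t hR
    by_contra hc
    exact hnot ⟨t, by omega, hR⟩


theorem getD_set_self {α : Type} {a : Array α} {i : Nat} {v d : α} (h : i < a.size) :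
    (a.setIfInBounds i v).getD i d = v := by
  simp [Array.getD_eq_getD_getElem?, h]

theorem getD_set_ne {α : Type} {a : Array α} {i j : Nat} {v d : α} (h : i ≠ j) :
    (a.setIfInBounds i v).getD j d = a.getD j d := by
  simp [Array.getD_eq_getD_getElem?, h]

theorem getD_replicate {α : Type} {n i : Nat} {x d : α} :
    (Array.replicate n x).getD i d = if i < n then x else d := by
  by_cases h : i < n <;> simp [Array.getD_eq_getD_getElem?, h]

theorem relaxA_getD (N : Nat) (ones : Array Int) (k : Int) (x y : Nat)
    (hxy : y &&& x = 0) (hx : x < 2 ^ N) (hy : y < 2 ^ N)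
    (hones : ∀ w, w < 2 ^ N → ones.getD w 0 = (pc w : Int)) :
    ∀ z dp, z &&& y = z → dp.size = 2 ^ N →
      (relaxA ones k x y z dp).size = 2 ^ N ∧
      (relaxA ones k x y z dp).getD x 0 = dp.getD x 0 ∧
      ∀ t,
        ((∃ w, w ≠ 0 ∧ w &&& y = w ∧ w ≤ z ∧ (pc w : Int) ≤ k ∧ t = x ||| w) →
          (relaxA ones k x y z dp).getD t 0 = min (dp.getD t 0) (dp.getD x 0 + 1)) ∧
        ((¬ ∃ w, w ≠ 0 ∧ w &&& y = w ∧ w ≤ z ∧ (pc w : Int) ≤ k ∧ t = x ||| w) →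
          (relaxA ones k x y z dp).getD t 0 = dp.getD t 0) := by
  intro z
  induction z using Nat.strong_induction_on with
  | _ z IH =>
  intro dp hzy hlen
  by_cases hz0 : z = 0
  · subst hz0
    rw [relaxA, dif_pos rfl]
    refine ⟨hlen, rfl, fun t => ⟨?_, fun _ => rfl⟩⟩
    rintro ⟨w, hw0, -, hwz, -, -⟩
    omega
  · have hzx : z &&& x = 0 := and_zero_of_sub hzy hxy
    have hzle : z ≤ y := le_of_and_eq hzy
    have hz2 : z < 2 ^ N := Nat.lt_of_le_of_lt hzle hy
    have hidx : x ||| z < 2 ^ N := Nat.or_lt_two_pow hx hz2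
    have hne : x ||| z ≠ x := or_ne_of_disj hz0 hzx
    have hz'y : ((z - 1) &&& y) &&& y = (z - 1) &&& y := and_right_self
    have hlt : (z - 1) &&& y < z := sub_and_lt y hz0
    have hcond : ones.getD z 0 = (pc z : Int) := hones z hz2
    rw [relaxA, dif_neg hz0]
    set dp' := (if ones.getD z 0 ≤ k then
        dp.setIfInBounds (x ||| z) (min (dp.getD (x ||| z) 0) (dp.getD x 0 + 1))
      else dp) with hdp'
    have hdp'len : dp'.size = 2 ^ N := by
      rw [hdp']; split <;> simp [hlen]
    have hdp'x : dp'.getD x 0 = dp.getD x 0 := by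
      rw [hdp']; split
      · exact getD_set_ne hne
      · rfl
    have hdp'hit : ones.getD z 0 ≤ k →
        dp'.getD (x ||| z) 0 = min (dp.getD (x ||| z) 0) (dp.getD x 0 + 1) := by
      intro hk
      rw [hdp', if_pos hk]
      exact getD_set_self (by rw [hlen]; exact hidx)
    have hdp'miss : ∀ t, ¬ (ones.getD z 0 ≤ k ∧ t = x ||| z) → dp'.getD t 0 = dp.getD t 0 := by
      intro t ht
      rw [hdp']
      split
      · next hk =>
          by_cases he : t = x ||| z
          · exact absurd ⟨hk, he⟩ ht
          · exact getD_set_ne (fun hh => he hh.symm)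
      · rfl
    have Pdec : ∀ t, (∃ w, w ≠ 0 ∧ w &&& y = w ∧ w ≤ z ∧ (pc w : Int) ≤ k ∧ t = x ||| w) ↔
        (((pc z : Int) ≤ k ∧ t = x ||| z) ∨
          (∃ w, w ≠ 0 ∧ w &&& y = w ∧ w ≤ (z - 1) &&& y ∧ (pc w : Int) ≤ k ∧ t = x ||| w)) := by
      intro t
      constructor
      · rintro ⟨w, hw0, hwy, hwz, hpk, rfl⟩
        by_cases hwz' : w = z
        · subst hwz'
          exact Or.inl ⟨hpk, rfl⟩
        · exact Or.inr ⟨w, hw0, hwy,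
            submask_pred y hzy hwy (Nat.lt_of_le_of_ne hwz hwz'), hpk, rfl⟩
      · rintro (⟨hpk, rfl⟩ | ⟨w, hw0, hwy, hwz, hpk, rfl⟩)
        · exact ⟨z, hz0, hzy, Nat.le.refl, hpk, rfl⟩
        · exact ⟨w, hw0, hwy, Nat.le_trans hwz (Nat.le_of_lt hlt), hpk, rfl⟩
    have Pinj : ∀ w, w &&& y = w → w ≤ (z - 1) &&& y → x ||| z = x ||| w → False := by
      intro w hwy hwz heq
      have hwx : w &&& x = 0 := and_zero_of_sub hwy hxy
      have : z = w := or_cancel_left hzx hwx heq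
      omega
    obtain ⟨hL, hX, hT⟩ := IH _ hlt dp' hz'y hdp'len
    refine ⟨hL, by rw [hX, hdp'x], ?_⟩
    intro t
    constructor
    · intro hP
      rcases (Pdec t).mp hP with ⟨hpk, rfl⟩ | hP'
      · have hk' : ones.getD z 0 ≤ k := by rw [hcond]; exact hpk
        by_cases hP'' : ∃ w, w ≠ 0 ∧ w &&& y = w ∧ w ≤ (z - 1) &&& y ∧ (pc w : Int) ≤ k ∧
            x ||| z = x ||| w
        · rw [(hT _).1 hP'', hdp'hit hk', hdp'x, min_assoc, min_self]
        · rw [(hT _).2 hP'', hdp'hit hk']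
      · have hne' : ¬ (ones.getD z 0 ≤ k ∧ t = x ||| z) := by
          rintro ⟨-, rfl⟩
          obtain ⟨w, -, hwy, hwz, -, heq⟩ := hP'
          exact Pinj w hwy hwz heq
        rw [(hT t).1 hP', hdp'x, hdp'miss t hne']
    · intro hnP
      have hnl : ¬ ((pc z : Int) ≤ k ∧ t = x ||| z) := fun h => hnP ((Pdec t).mpr (Or.inl h))
      have hnr : ¬ (∃ w, w ≠ 0 ∧ w &&& y = w ∧ w ≤ (z - 1) &&& y ∧ (pc w : Int) ≤ k ∧
          t = x ||| w) := fun h => hnP ((Pdec t).mpr (Or.inr h))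
      have hne' : ¬ (ones.getD z 0 ≤ k ∧ t = x ||| z) := by
        rw [hcond]; exact hnl
      rw [(hT t).2 hnr, hdp'miss t hne']


noncomputable def capSV (N : Nat) (prep : List Nat) (k : Int) (X t : Nat) : Nat :=
  sInf ({s | RchV N prep k X s t} ∪ {N})

theorem Stp_iff_P (N : Nat) (prep : List Nat) (k : Int) (x t : Nat) :
    (∃ w, w ≠ 0 ∧ w &&& availMask N prep x = w ∧ w ≤ availMask N prep x ∧
        (pc w : Int) ≤ k ∧ t = x ||| w) ↔ Stp N prep k x t := by
  constructor
  · rintro ⟨w, h0, h1, -, h3, h4⟩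
    exact ⟨w, h0, h1, h3, h4⟩
  · rintro ⟨w, h0, h1, h3, h4⟩
    exact ⟨w, h0, h1, le_of_and_eq h1, h3, h4⟩

theorem SV_succX_of_Stp {N : Nat} {prep : List Nat} {k : Int} {X t : Nat}
    (h : Stp N prep k X t) :
    {s | RchV N prep k (X + 1) s t} =
      {s | RchV N prep k X s t} ∪ {s | ∃ s', s' ∈ {u | RchV N prep k X u X} ∧ s = s' + 1} := by
  ext s
  simp only [Set.mem_setOf_eq, Set.mem_union]
  rw [RchV_succX]
  constructor
  · rintro (h1 | ⟨s', rfl, h2, -⟩)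
    · exact Or.inl h1
    · exact Or.inr ⟨s', h2, rfl⟩
  · rintro (h1 | ⟨s', h2, rfl⟩)
    · exact Or.inl h1
    · exact Or.inr ⟨s', rfl, h2, h⟩

theorem SV_succX_of_not_Stp {N : Nat} {prep : List Nat} {k : Int} {X t : Nat}
    (h : ¬ Stp N prep k X t) :
    {s | RchV N prep k (X + 1) s t} = {s | RchV N prep k X s t} := by
  ext s
  simp only [Set.mem_setOf_eq]
  rw [RchV_succX]
  constructor
  · rintro (h1 | ⟨s', rfl, -, h3⟩)
    · exact h1
    · exact absurd h3 h
  · exact Or.inl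

theorem stepA_inv (N : Nat) (prep : List Nat) (k : Int) (ones : Array Int)
    (hones : ∀ w, w < 2 ^ N → ones.getD w 0 = (pc w : Int))
    (X : Nat) (hX : X < 2 ^ N) (dp : Array Int) (hlen : dp.size = 2 ^ N)
    (hinv : ∀ t, t < 2 ^ N →
      dp.getD t 0 = (capSV N prep k X t : Int)) :
    (stepA (N : Int) k N prep ones dp X).size = 2 ^ N ∧
    ∀ t, t < 2 ^ N →
      (stepA (N : Int) k N prep ones dp X).getD t 0 =
        (capSV N prep k (X + 1) t : Int) := by
  simp only [capSV] at hinv ⊢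
  have hdpX := hinv X hX
  have hBle : sInf ({s | RchV N prep k X s X} ∪ {N}) ≤ N := capInf_le _ _
  unfold stepA
  by_cases hskip : dp.getD X 0 = (N : Int)
  · rw [if_pos hskip]
    refine ⟨hlen, fun t ht => ?_⟩
    have hBN : sInf ({s | RchV N prep k X s X} ∪ {N}) = N := by
      have := hskip.symm.trans hdpX
      exact_mod_cast this.symm
    by_cases hst : Stp N prep k X t
    · rw [SV_succX_of_Stp hst, capInf_union_succ_stable hBN]
      exact hinv t ht
    · rw [SV_succX_of_not_Stp hst]
      exact hinv t ht
  · rw [if_neg hskip]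
    have hBlt : sInf ({s | RchV N prep k X s X} ∪ {N}) < N := by
      rcases Nat.lt_or_ge (sInf ({s | RchV N prep k X s X} ∪ {N})) N with h | h
      · exact h
      · exfalso
        apply hskip
        rw [hdpX]
        have : sInf ({s | RchV N prep k X s X} ∪ {N}) = N := by omega
        rw [this]
    obtain ⟨hL, -, hT⟩ := relaxA_getD N ones k X (availMask N prep X)
      (avail_and N prep X) hX (avail_lt N prep X) hones (availMask N prep X) dp
      (Nat.and_self _) hlen
    refine ⟨hL, fun t ht => ?_⟩
    by_cases hst : Stp N prep k X t
    · rw [(hT t).1 (by rw [Stp_iff_P]; exact hst), hinv t ht, hdpX,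
        SV_succX_of_Stp hst, capInf_union_succ hBlt]
      push_cast [Nat.cast_min]
      rfl
    · rw [(hT t).2 (by rw [Stp_iff_P]; exact hst), hinv t ht, SV_succX_of_not_Stp hst]

theorem foldA_inv (N : Nat) (prep : List Nat) (k : Int) (ones : Array Int)
    (hones : ∀ w, w < 2 ^ N → ones.getD w 0 = (pc w : Int)) :
    ∀ M, M ≤ 2 ^ N →
      ((List.range M).foldl (fun dp x => stepA (N : Int) k N prep ones dp x)
          ((Array.replicate (2 ^ N) ((N : Int))).setIfInBounds 0 0)).size = 2 ^ N ∧
      ∀ t, t < 2 ^ N →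
        ((List.range M).foldl (fun dp x => stepA (N : Int) k N prep ones dp x)
            ((Array.replicate (2 ^ N) ((N : Int))).setIfInBounds 0 0)).getD t 0 =
          (capSV N prep k M t : Int) := by
  simp only [capSV]
  intro M
  induction M with
  | zero =>
    intro _
    constructor
    · simp
    · intro t ht
      simp only [List.range_zero, List.foldl_nil]
      by_cases ht0 : t = 0
      · subst ht0
        rw [getD_set_self (by simp [Nat.two_pow_pos N])]
        have : sInf ({s | RchV N prep k 0 s 0} ∪ {N}) = 0 := by
          exact capInf_eq (S := {s | RchV N prep k 0 s 0})
            (Or.inl (show RchV N prep k 0 0 0 from RchV.zero 0))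
            (fun u _ => Nat.zero_le u) (Nat.zero_le N)
        rw [this]
        rfl
      · rw [getD_set_ne (fun h => ht0 h.symm)]
        have hS : sInf ({s | RchV N prep k 0 s t} ∪ {N}) = N := by
          refine capInf_eq (S := {s | RchV N prep k 0 s t}) (Or.inr rfl) ?_ Nat.le.refl
          intro u hu
          exact absurd (RchV_zero_iff.mp hu).2 ht0
        rw [hS, getD_replicate, if_pos ht]
  | succ M ih =>
    intro hM
    have hMlt : M < 2 ^ N := hM
    obtain ⟨hL, hI⟩ := ih (Nat.le_of_lt hMlt)
    rw [List.range_succ, List.foldl_append, List.foldl_cons, List.foldl_nil]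
    exact stepA_inv N prep k ones hones M hMlt _ hL hI
theorem ones_getD (N : Nat) {w : Nat} (hw : w < 2 ^ N) :
    (((List.range (2 ^ N)).map fun x => (pc x : Int)).toArray).getD w 0 = (pc w : Int) := by
  simp [Array.getD_eq_getD_getElem?, hw]

theorem portA_eq_dCap (n : Int) (deps : List (List Int)) (k : Int) (hn : 0 ≤ n) :
    minNumberOfSemesters n deps k = (dCap n.toNat (buildPrep n deps) k : Int) := by
  obtain ⟨N, rfl⟩ : ∃ N : Nat, n = (N : Int) := ⟨n.toNat, (Int.toNat_of_nonneg hn).symm⟩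
  simp only [minNumberOfSemesters, Int.toNat_natCast]
  set prep := buildPrep (↑N) deps with hprep
  obtain ⟨hL, hI⟩ := foldA_inv N prep k
    (((List.range (2 ^ N)).map fun x => (pc x : Int)).toArray)
    (fun w hw => ones_getD N hw) (2 ^ N) Nat.le.refl
  set dpF := (List.range (2 ^ N)).foldl
      (fun dp x => stepA (↑N) k N prep
        (((List.range (2 ^ N)).map fun x => (pc x : Int)).toArray) dp x)
      ((Array.replicate (2 ^ N) ((N : Int))).setIfInBounds 0 0) with hdpF
  have hpos : 0 < 2 ^ N := Nat.two_pow_pos N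
  have hfull : 2 ^ N - 1 < 2 ^ N := by omega
  have hlt' : 2 ^ N - 1 < dpF.size := by rw [hL]; exact hfull
  have hv := hI (2 ^ N - 1) hfull
  have hgd : dpF.getD (2 ^ N - 1) 0 = dpF[2 ^ N - 1]'hlt' := by
    rw [Array.getD_eq_getD_getElem?, Array.getElem?_eq_getElem hlt']
    rfl
  have hlast : dpF.back? = some (dpF[2 ^ N - 1]'hlt') := by
    rw [Array.back?_eq_getElem?, hL, Array.getElem?_eq_getElem hlt']
  rw [hlast]
  show dpF[2 ^ N - 1]'hlt' = _
  rw [← hgd, hv]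
  have hset : {s | RchV N prep k (2 ^ N) s (2 ^ N - 1)} = {s | Rch N prep k s (2 ^ N - 1)} := by
    ext s
    exact ⟨RchV_to_Rch, fun h => Rch_to_RchV h _ (by omega)⟩
  unfold capSV dCap
  rw [hset]


-- targets of one submask scan
def Tgt (k : Int) (x y z m : Nat) : Prop :=
  ∃ w, w ≠ 0 ∧ w &&& y = w ∧ w ≤ z ∧ (pc w : Int) ≤ k ∧ m = x ||| w

theorem Tgt_dec {k : Int} {x y z m : Nat} (hzy : z &&& y = z) (hz0 : z ≠ 0) :
    Tgt k x y z m ↔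
      (((pc z : Int) ≤ k ∧ m = x ||| z) ∨ Tgt k x y ((z - 1) &&& y) m) := by
  have hlt : (z - 1) &&& y < z := sub_and_lt y hz0
  constructor
  · rintro ⟨w, hw0, hwy, hwz, hpk, rfl⟩
    by_cases hwz' : w = z
    · subst hwz'
      exact Or.inl ⟨hpk, rfl⟩
    · exact Or.inr ⟨w, hw0, hwy,
        submask_pred y hzy hwy (Nat.lt_of_le_of_ne hwz hwz'), hpk, rfl⟩
  · rintro (⟨hpk, rfl⟩ | ⟨w, hw0, hwy, hwz, hpk, rfl⟩)
    · exact ⟨z, hz0, hzy, Nat.le.refl, hpk, rfl⟩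
    · exact ⟨w, hw0, hwy, Nat.le_trans hwz (Nat.le_of_lt hlt), hpk, rfl⟩

theorem Tgt_zero {k : Int} {x y m : Nat} : ¬ Tgt k x y 0 m := by
  rintro ⟨w, hw0, -, hwz, -, -⟩
  omega

theorem Tgt_not_self {k : Int} {x y z : Nat} (hxy : y &&& x = 0) (hzy : z &&& y = z)
    (hz0 : z ≠ 0) : ¬ Tgt k x y ((z - 1) &&& y) (x ||| z) := by
  rintro ⟨w, -, hwy, hwz, -, heq⟩
  have hzx : z &&& x = 0 := and_zero_of_sub hzy hxy
  have hwx : w &&& x = 0 := and_zero_of_sub hwy hxy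
  have : z = w := or_cancel_left hzx hwx heq
  have hlt : (z - 1) &&& y < z := sub_and_lt y hz0
  omega

theorem Tgt_iff_Stp (N : Nat) (prep : List Nat) (k : Int) (x m : Nat) :
    Tgt k x (availMask N prep x) (availMask N prep x) m ↔ Stp N prep k x m := by
  unfold Tgt
  exact Stp_iff_P N prep k x m

theorem scanB_spec (N : Nat) (k : Int) (full x y : Nat) (hxy : y &&& x = 0)
    (hx : x < 2 ^ N) (hy : y < 2 ^ N) :
    ∀ z vis nxt, z &&& y = z → vis.size = 2 ^ N →
      (∀ m, m ∈ nxt → vis.getD m false = true) →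
      (scanB k full x y z vis nxt = none ↔ Tgt k x y z full) ∧
      (∀ vis' nxt', scanB k full x y z vis nxt = some (vis', nxt') →
        vis'.size = 2 ^ N ∧
        (∀ m, vis'.getD m false = true ↔
          vis.getD m false = true ∨ (Tgt k x y z m ∧ m ≠ full)) ∧
        (∀ m, m ∈ nxt' ↔
          m ∈ nxt ∨ (Tgt k x y z m ∧ m ≠ full ∧ vis.getD m false = false)) ∧
        (∀ m, m ∈ nxt' → vis'.getD m false = true)) := by
  intro z
  induction z using Nat.strong_induction_on with
  | _ z IH =>
  intro vis nxt hzy hsize hsub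
  by_cases hz0 : z = 0
  · subst hz0
    rw [scanB, dif_pos rfl]
    refine ⟨⟨fun h => by simp at h, fun h => absurd h Tgt_zero⟩, ?_⟩
    intro vis' nxt' h
    injection h with h
    injection h with h1 h2
    subst h1; subst h2
    exact ⟨hsize, fun m => ⟨fun h => Or.inl h, fun h => h.elim id (fun h => absurd h.1 Tgt_zero)⟩,
      fun m => ⟨Or.inl, fun h => h.elim id (fun h => absurd h.1 Tgt_zero)⟩, hsub⟩
  · have hlt : (z - 1) &&& y < z := sub_and_lt y hz0
    have hz'y : ((z - 1) &&& y) &&& y = (z - 1) &&& y := and_right_self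
    have hzle : z ≤ y := le_of_and_eq hzy
    have hz2 : z < 2 ^ N := Nat.lt_of_le_of_lt hzle hy
    have hidx : x ||| z < 2 ^ N := Nat.or_lt_two_pow hx hz2
    rw [scanB, dif_neg hz0]
    by_cases hk : (pc z : Int) ≤ k
    · rw [if_pos hk]
      by_cases heqf : x ||| z = full
      · rw [if_pos heqf]
        refine ⟨⟨fun _ => ⟨z, hz0, hzy, Nat.le.refl, hk, heqf.symm⟩, fun _ => rfl⟩, ?_⟩
        intro vis' nxt' h
        simp at h
      · rw [if_neg heqf]
        cases hmem : vis.getD (x ||| z) false with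
        | true =>
          rw [if_pos rfl]
          obtain ⟨hnone, hsome⟩ := IH _ hlt vis nxt hz'y hsize hsub
          refine ⟨?_, ?_⟩
          · rw [hnone, Tgt_dec hzy hz0]
            constructor
            · exact Or.inr
            · rintro (⟨-, hf⟩ | h)
              · exact absurd hf.symm heqf
              · exact h
          · intro vis' nxt' h
            obtain ⟨hsz, hv, hn, hs⟩ := hsome vis' nxt' h
            refine ⟨hsz, fun m => ?_, fun m => ?_, hs⟩
            · rw [hv m, Tgt_dec hzy hz0]
              constructor
              · rintro (h1 | ⟨h1, h2⟩)
                · exact Or.inl h1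
                · exact Or.inr ⟨Or.inr h1, h2⟩
              · rintro (h1 | ⟨(⟨-, rfl⟩ | h1), h2⟩)
                · exact Or.inl h1
                · exact Or.inl hmem
                · exact Or.inr ⟨h1, h2⟩
            · rw [hn m, Tgt_dec hzy hz0]
              constructor
              · rintro (h1 | ⟨h1, h2, h3⟩)
                · exact Or.inl h1
                · exact Or.inr ⟨Or.inr h1, h2, h3⟩
              · rintro (h1 | ⟨(⟨-, rfl⟩ | h1), h2, h3⟩)
                · exact Or.inl h1
                · rw [hmem] at h3
                  simp at h3
                · exact Or.inr ⟨h1, h2, h3⟩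
        | false =>
          rw [if_neg (by simp)]
          have hvidx : x ||| z < vis.size := by rw [hsize]; exact hidx
          have hv0 : ∀ m, (vis.setIfInBounds (x ||| z) true).getD m false = true ↔
              (vis.getD m false = true ∨ m = x ||| z) := by
            intro m
            by_cases he : m = x ||| z
            · subst he
              rw [getD_set_self hvidx]
              simp
            · rw [getD_set_ne (fun hh => he hh.symm)]
              simp [he]
          have hsub' : ∀ m, m ∈ nxt ++ [x ||| z] →
              (vis.setIfInBounds (x ||| z) true).getD m false = true := by
            intro m hm
            rcases List.mem_append.mp hm with h | h
            · exact (hv0 m).mpr (Or.inl (hsub m h))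
            · rw [List.mem_singleton] at h
              exact (hv0 m).mpr (Or.inr h)
          obtain ⟨hnone, hsome⟩ := IH _ hlt _ _ hz'y (by simp [hsize]) hsub'
          have hns := Tgt_not_self (k := k) hxy hzy hz0
          refine ⟨?_, ?_⟩
          · rw [hnone, Tgt_dec hzy hz0]
            constructor
            · exact Or.inr
            · rintro (⟨-, hf⟩ | h)
              · exact absurd hf.symm heqf
              · exact h
          · intro vis' nxt' h
            obtain ⟨hsz, hv, hn, hs⟩ := hsome vis' nxt' h
            refine ⟨hsz, fun m => ?_, fun m => ?_, hs⟩
            · rw [hv m, hv0 m, Tgt_dec hzy hz0]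
              constructor
              · rintro ((h1 | rfl) | ⟨h1, h2⟩)
                · exact Or.inl h1
                · exact Or.inr ⟨Or.inl ⟨hk, rfl⟩, heqf⟩
                · exact Or.inr ⟨Or.inr h1, h2⟩
              · rintro (h1 | ⟨(⟨-, rfl⟩ | h1), h2⟩)
                · exact Or.inl (Or.inl h1)
                · exact Or.inl (Or.inr rfl)
                · exact Or.inr ⟨h1, h2⟩
            · rw [hn m, Tgt_dec hzy hz0]
              simp only [List.mem_append, List.mem_singleton]
              have hv0f : ∀ m', (vis.setIfInBounds (x ||| z) true).getD m' false = false ↔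
                  (vis.getD m' false = false ∧ m' ≠ x ||| z) := by
                intro m'
                cases hcur : (vis.setIfInBounds (x ||| z) true).getD m' false with
                | true =>
                  have := (hv0 m').mp hcur
                  constructor
                  · intro hfalse
                    simp at hfalse
                  · rintro ⟨hf, hne2⟩
                    rcases this with h | h
                    · rw [hf] at h
                      simp at h
                    · exact absurd h hne2
                | false =>
                  have hnv : ¬ (vis.getD m' false = true ∨ m' = x ||| z) := by
                    intro h
                    have := (hv0 m').mpr h
                    rw [hcur] at this
                    simp at this
                  rw [not_or] at hnv
                  constructor
                  · intro _
                    refine ⟨?_, hnv.2⟩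
                    cases h' : vis.getD m' false with
                    | true => exact absurd h' hnv.1
                    | false => rfl
                  · intro _
                    rfl
              constructor
              · rintro ((h1 | rfl) | ⟨h1, h2, h3⟩)
                · exact Or.inl h1
                · exact Or.inr ⟨Or.inl ⟨hk, rfl⟩, heqf, hmem⟩
                · have := (hv0f m).mp h3
                  exact Or.inr ⟨Or.inr h1, h2, this.1⟩
              · rintro (h1 | ⟨(⟨-, rfl⟩ | h1), h2, h3⟩)
                · exact Or.inl (Or.inl h1)
                · exact Or.inl (Or.inr rfl)
                · refine Or.inr ⟨h1, h2, (hv0f m).mpr ⟨h3, ?_⟩⟩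
                  rintro rfl
                  exact hns h1
    · rw [if_neg hk]
      obtain ⟨hnone, hsome⟩ := IH _ hlt vis nxt hz'y hsize hsub
      have hTiff : ∀ m, Tgt k x y z m ↔ Tgt k x y ((z - 1) &&& y) m := by
        intro m
        rw [Tgt_dec hzy hz0]
        constructor
        · rintro (⟨h1, -⟩ | h)
          · exact absurd h1 hk
          · exact h
        · exact Or.inr
      refine ⟨by rw [hnone, hTiff], ?_⟩
      intro vis' nxt' h
      obtain ⟨hsz, hv, hn, hs⟩ := hsome vis' nxt' h
      exact ⟨hsz, fun m => by rw [hv m, hTiff], fun m => by rw [hn m, hTiff], hs⟩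

theorem roundB_spec (k : Int) (N : Nat) (prep : List Nat) (full : Nat) :
    ∀ front vis nxt, (∀ x, x ∈ front → x < 2 ^ N) → vis.size = 2 ^ N →
      (∀ m, m ∈ nxt → vis.getD m false = true) →
      (roundB k N prep full front vis nxt = none ↔ ∃ x ∈ front, Stp N prep k x full) ∧
      (∀ vis' nxt', roundB k N prep full front vis nxt = some (vis', nxt') →
        vis'.size = 2 ^ N ∧
        (∀ m, vis'.getD m false = true ↔
          vis.getD m false = true ∨ ((∃ x ∈ front, Stp N prep k x m) ∧ m ≠ full)) ∧
        (∀ m, m ∈ nxt' ↔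
          m ∈ nxt ∨ ((∃ x ∈ front, Stp N prep k x m) ∧ m ≠ full ∧
            vis.getD m false = false)) ∧
        (∀ m, m ∈ nxt' → vis'.getD m false = true)) := by
  intro front
  induction front with
  | nil =>
    intro vis nxt hb hsize hsub
    refine ⟨⟨fun h => by simp [roundB] at h, fun h => by simp at h⟩, ?_⟩
    intro vis' nxt' h
    simp only [roundB] at h
    injection h with h
    injection h with h1 h2
    subst h1; subst h2
    refine ⟨hsize, fun m => ⟨fun h => Or.inl h, ?_⟩, fun m => ⟨Or.inl, ?_⟩, hsub⟩
    · rintro (h | ⟨⟨x, hx, -⟩, -⟩)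
      · exact h
      · simp at hx
    · rintro (h | ⟨⟨x, hx, -⟩, -⟩)
      · exact h
      · simp at hx
  | cons x rest ih =>
    intro vis nxt hb hsize hsub
    have hx : x < 2 ^ N := hb x List.mem_cons_self
    obtain ⟨hnone, hsome⟩ := scanB_spec N k full x (availMask N prep x)
      (avail_and N prep x) hx (avail_lt N prep x) (availMask N prep x) vis nxt
      (Nat.and_self _) hsize hsub
    cases hscan : scanB k full x (availMask N prep x) (availMask N prep x) vis nxt with
    | none =>
      have hgoal : roundB k N prep full (x :: rest) vis nxt = none := by
        simp only [roundB, hscan]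
      have hstp : Stp N prep k x full := (Tgt_iff_Stp N prep k x full).mp (hnone.mp hscan)
      refine ⟨⟨fun _ => ⟨x, List.mem_cons_self, hstp⟩, fun _ => hgoal⟩, ?_⟩
      intro vis' nxt' h
      rw [hgoal] at h
      simp at h
    | some p =>
      obtain ⟨vis1, nxt1⟩ := p
      have hgoal : roundB k N prep full (x :: rest) vis nxt
          = roundB k N prep full rest vis1 nxt1 := by
        simp only [roundB, hscan]
      rw [hgoal]
      obtain ⟨hsz1, hv1, hn1, hs1⟩ := hsome vis1 nxt1 hscan
      have hnx : ¬ Stp N prep k x full := by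
        intro hstp
        rw [← Tgt_iff_Stp N prep k x full, ← hnone] at hstp
        rw [hstp] at hscan
        simp at hscan
      obtain ⟨ihnone, ihsome⟩ := ih vis1 nxt1
        (fun x' hx' => hb x' (List.mem_cons_of_mem _ hx')) hsz1 hs1
      refine ⟨?_, ?_⟩
      · rw [ihnone]
        constructor
        · rintro ⟨x', hx', hstp⟩
          exact ⟨x', List.mem_cons_of_mem _ hx', hstp⟩
        · rintro ⟨x', hx', hstp⟩
          rcases List.mem_cons.mp hx' with rfl | hx'
          · exact absurd hstp hnx
          · exact ⟨x', hx', hstp⟩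
      · intro vis' nxt' h
        obtain ⟨hsz, hv, hn, hs⟩ := ihsome vis' nxt' h
        have hTx : ∀ m, Tgt k x (availMask N prep x) (availMask N prep x) m ↔
            Stp N prep k x m := fun m => Tgt_iff_Stp N prep k x m
        refine ⟨hsz, fun m => ?_, fun m => ?_, hs⟩
        · rw [hv m, hv1 m, hTx m]
          constructor
          · rintro ((h1 | ⟨h1, h2⟩) | ⟨⟨x', hx', h1⟩, h2⟩)
            · exact Or.inl h1
            · exact Or.inr ⟨⟨x, List.mem_cons_self, h1⟩, h2⟩
            · exact Or.inr ⟨⟨x', List.mem_cons_of_mem _ hx', h1⟩, h2⟩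
          · rintro (h1 | ⟨⟨x', hx', h1⟩, h2⟩)
            · exact Or.inl (Or.inl h1)
            · rcases List.mem_cons.mp hx' with rfl | hx'
              · exact Or.inl (Or.inr ⟨h1, h2⟩)
              · exact Or.inr ⟨⟨x', hx', h1⟩, h2⟩
        · rw [hn m, hn1 m, hTx m]
          constructor
          · rintro ((h1 | ⟨h1, h2, h3⟩) | ⟨⟨x', hx', h1⟩, h2, h3⟩)
            · exact Or.inl h1
            · exact Or.inr ⟨⟨x, List.mem_cons_self, h1⟩, h2, h3⟩
            · refine Or.inr ⟨⟨x', List.mem_cons_of_mem _ hx', h1⟩, h2, ?_⟩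
              cases hcur : vis.getD m false with
              | true =>
                have := (hv1 m).mpr (Or.inl hcur)
                rw [h3] at this
                simp at this
              | false => rfl
          · rintro (h1 | ⟨⟨x', hx', h1⟩, h2, h3⟩)
            · exact Or.inl (Or.inl h1)
            · rcases List.mem_cons.mp hx' with rfl | hx'
              · exact Or.inl (Or.inr ⟨h1, h2, h3⟩)
              · cases hm1 : vis1.getD m false with
                | true =>
                  rcases (hv1 m).mp hm1 with hm | ⟨hm, -⟩
                  · rw [hm] at h3
                    simp at h3
                  · exact Or.inl (Or.inr ⟨(hTx m).mp hm, h2, h3⟩)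
                | false =>
                  exact Or.inr ⟨⟨x', hx', h1⟩, h2, rfl⟩

theorem bfsB_spec (N : Nat) (prep : List Nat) (k : Int) :
    ∀ fuel s front vis, fuel + s = N → vis.size = 2 ^ N →
      (∀ m, vis.getD m false = true ↔ dLE N prep k s m) →
      (∀ m, m ∈ front ↔ Frt N prep k s m) →
      ¬ dLE N prep k s (2 ^ N - 1) →
      bfsB (N : Int) k N prep (2 ^ N - 1) fuel ((s : Int) + 1) front vis
        = (dCap N prep k : Int) := by
  intro fuel
  induction fuel with
  | zero =>
    intro s front vis hfs hsize hvis hfront hnf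
    have hs : s = N := by omega
    rw [hs] at hnf
    show (N : Int) = _
    have hd : dCap N prep k = N := by
      refine capInf_eq (S := {s | Rch N prep k s (2 ^ N - 1)}) (Or.inr rfl) ?_ Nat.le.refl
      intro u hu
      by_contra hc
      exact hnf ⟨u, by omega, hu⟩
    rw [hd]
  | succ fuel ih =>
    intro s front vis hfs hsize hvis hfront hnf
    have hb : ∀ x, x ∈ front → x < 2 ^ N := by
      intro x hxm
      exact Rch_lt_pow ((hfront x).mp hxm).1
    obtain ⟨hnone, hsome⟩ := roundB_spec k N prep (2 ^ N - 1) front vis [] hb hsize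
      (by simp)
    cases hround : roundB k N prep (2 ^ N - 1) front vis [] with
    | none =>
      have hgoal : bfsB (N : Int) k N prep (2 ^ N - 1) (fuel + 1) ((s : Int) + 1) front vis
          = (s : Int) + 1 := by
        simp only [bfsB, hround]
      rw [hgoal]
      obtain ⟨x, hxm, hstp⟩ := hnone.mp hround
      have hxF := (hfront x).mp hxm
      have hR : Rch N prep k (s + 1) (2 ^ N - 1) := Rch.succ hxF.1 hstp
      have hd : dCap N prep k = s + 1 := by
        refine capInf_eq (S := {s | Rch N prep k s (2 ^ N - 1)}) (Or.inl hR) ?_ (by omega)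
        intro u hu
        by_contra hc
        exact hnf ⟨u, by omega, hu⟩
      rw [hd]
      push_cast
      ring
    | some p =>
      obtain ⟨vis', nxt⟩ := p
      have hgoal : bfsB (N : Int) k N prep (2 ^ N - 1) (fuel + 1) ((s : Int) + 1) front vis
          = bfsB (N : Int) k N prep (2 ^ N - 1) fuel ((s : Int) + 1 + 1) nxt vis' := by
        simp only [bfsB, hround]
      rw [hgoal]
      obtain ⟨hsz, hv, hn, -⟩ := hsome vis' nxt hround
      have hnstp : ¬ ∃ x ∈ front, Stp N prep k x (2 ^ N - 1) := by
        intro h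
        rw [← hnone] at h
        rw [h] at hround
        simp at hround
      have hnstp' : ¬ ∃ x, Frt N prep k s x ∧ Stp N prep k x (2 ^ N - 1) := by
        rintro ⟨x, hF, hS⟩
        exact hnstp ⟨x, (hfront x).mpr hF, hS⟩
      have hnf' : ¬ dLE N prep k (s + 1) (2 ^ N - 1) := by
        intro h
        rcases dLE_succ_iff.mp h with h | h
        · exact hnf h
        · exact hnstp' h
      have hvmf : ∀ m, vis.getD m false = false ↔ ¬ dLE N prep k s m := by
        intro m
        cases hcur : vis.getD m false with
        | true =>
          have := (hvis m).mp hcur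
          constructor
          · intro hfalse
            simp at hfalse
          · intro hnd
            exact absurd this hnd
        | false =>
          have : ¬ dLE N prep k s m := by
            intro hd
            have := (hvis m).mpr hd
            rw [hcur] at this
            simp at this
          exact ⟨fun _ => this, fun _ => rfl⟩
      have hvis' : ∀ m, vis'.getD m false = true ↔ dLE N prep k (s + 1) m := by
        intro m
        rw [hv m]
        constructor
        · rintro (h | ⟨⟨x, hxm, hstp⟩, -⟩)
          · exact dLE_succ_iff.mpr (Or.inl ((hvis m).mp h))
          · exact dLE_succ_iff.mpr (Or.inr ⟨x, (hfront x).mp hxm, hstp⟩)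
        · intro h
          have hmf : m ≠ 2 ^ N - 1 := by
            rintro rfl
            exact hnf' h
          rcases dLE_succ_iff.mp h with h' | ⟨x, hF, hS⟩
          · exact Or.inl ((hvis m).mpr h')
          · exact Or.inr ⟨⟨x, (hfront x).mpr hF, hS⟩, hmf⟩
      have hfront' : ∀ m, m ∈ nxt ↔ Frt N prep k (s + 1) m := by
        intro m
        rw [hn m]
        constructor
        · rintro (h | ⟨⟨x, hxm, hstp⟩, hmf, hnv⟩)
          · simp at h
          · exact Frt_succ_iff.mpr ⟨⟨x, (hfront x).mp hxm, hstp⟩,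
              (hvmf m).mp hnv⟩
        · intro h
          obtain ⟨⟨x, hF, hS⟩, hnd⟩ := Frt_succ_iff.mp h
          have hRch : Rch N prep k (s + 1) m := Rch.succ hF.1 hS
          have hmf : m ≠ 2 ^ N - 1 := by
            rintro rfl
            exact hnf' ⟨s + 1, Nat.le.refl, hRch⟩
          exact Or.inr ⟨⟨x, (hfront x).mpr hF, hS⟩, hmf, (hvmf m).mpr hnd⟩
      have hrec := ih (s + 1) nxt vis' (by omega) hsz hvis' hfront' hnf'
      have hsem : ((s : Int) + 1 + 1) = (((s + 1 : Nat) : Int) + 1) := by push_cast; ring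
      rw [hsem]
      exact hrec

theorem portB_eq_dCap (n : Int) (deps : List (List Int)) (k : Int) (hn : 0 ≤ n) :
    minNumberOfSemesters_alt n deps k = (dCap n.toNat (buildPrep n deps) k : Int) := by
  obtain ⟨N, rfl⟩ : ∃ N : Nat, n = (N : Int) := ⟨n.toNat, (Int.toNat_of_nonneg hn).symm⟩
  simp only [minNumberOfSemesters_alt, Int.toNat_natCast]
  set prep := buildPrep (↑N) deps with hprep
  by_cases hN : N = 0
  · subst hN
    show ((0 : Nat) : Int) = _
    have hd : dCap 0 prep k = 0 := by
      refine capInf_eq (S := {s | Rch 0 prep k s (2 ^ 0 - 1)})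
        (Or.inl (show Rch 0 prep k 0 (2 ^ 0 - 1) from Rch.zero))
        (fun u _ => Nat.zero_le u) (Nat.zero_le 0)
    rw [hd]
  · have h2 : 2 ≤ 2 ^ N := by
      calc 2 = 2 ^ 1 := by norm_num
      _ ≤ 2 ^ N := Nat.pow_le_pow_right (by decide) (by omega)
    have hfull0 : 2 ^ N - 1 ≠ 0 := by omega
    have hsize0 : ((Array.replicate (2 ^ N) false).setIfInBounds 0 true).size = 2 ^ N := by
      simp
    have hvis : ∀ m, ((Array.replicate (2 ^ N) false).setIfInBounds 0 true).getD m false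
        = true ↔ dLE N prep k 0 m := by
      intro m
      by_cases hm : m = 0
      · subst hm
        rw [getD_set_self (by simp [Nat.two_pow_pos N])]
        simp only [true_iff]
        exact ⟨0, Nat.le.refl, Rch.zero⟩
      · rw [getD_set_ne (fun h => hm h.symm), getD_replicate]
        constructor
        · intro h
          split at h <;> simp at h
        · rintro ⟨t, ht, hR⟩
          have ht0 : t = 0 := by omega
          subst ht0
          exact absurd (Rch_zero_iff.mp hR) hm
    have hfront : ∀ m, m ∈ [0] ↔ Frt N prep k 0 m := by
      intro m
      simp only [List.mem_singleton]
      constructor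
      · rintro rfl
        exact ⟨Rch.zero, fun t _ => Nat.zero_le t⟩
      · intro h
        exact Rch_zero_iff.mp h.1
    have hnf : ¬ dLE N prep k 0 (2 ^ N - 1) := by
      rintro ⟨t, ht, hR⟩
      have ht0 : t = 0 := by omega
      subst ht0
      exact hfull0 (Rch_zero_iff.mp hR)
    have := bfsB_spec N prep k N 0 [0] _ (by omega) hsize0 hvis hfront hnf
    simpa using this

theorem minNumberOfSemesters_spec : Claim_equal_minNumberOfSemesters := by
  intro n deps k _ hpre
  unfold Spec_minNumberOfSemesters
  rw [portA_eq_dCap n deps k hpre.1, portB_eq_dCap n deps k hpre.1]
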